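-- pv_equiv track=rewrite | github.com/myylogic/cevahir-ai | tokenizer_management/bpe/tokenization/pretokenizer.py | _tokenize_whitespace_with_spaces
-- ===== SOURCE A (Python) =====
-- from typing import List, Union, Tuple, Optional, Dict, Pattern
--
-- def _tokenize_whitespace_with_spaces(text: str) -> List[str]:
--     """Whitespace bazlı tokenizasyon - BOŞLUK KORUYARAK."""
--     if not text:
--         return []
--
--     tokens = []
--     current_token = ""
--
--     for char in text:
--         if char.isspace():
--             if current_token:
--                 tokens.append(current_token)
--                 current_token = ""
--             tokens.append(' ')  # Boşluk karakterini koru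
--         else:
--             current_token += char
--
--     if current_token:
--         tokens.append(current_token)
--
--     return tokens
-- ===== SOURCE B (Python) =====
-- def _tokenize_whitespace_with_spaces(text: str):
--     """Run-based single pass: scan maximal runs, emit one single-space token per whitespace
--     char and each non-whitespace run as one token."""
--     tokens = []
--     i, n = 0, len(text)
--     while i < n:
--         j = i
--         if text[i].isspace():
--             while j < n and text[j].isspace():
--                 j += 1
--             tokens.extend(' ' * (j - i))
--         else:
--             while j < n and not text[j].isspace():
--                 j += 1
--             tokens.append(text[i:j])
--         i = j
--     return tokens
-- ===== Notes on version B (the rewrite author's own statement) =====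
-- stated objective: alternative
-- what changed: Replaced the char-by-char accumulator with pending-token state by a run-based scan that jumps over maximal whitespace/non-whitespace runs, emitting one single-space token per whitespace character and each word run via a single slice.
import Mathlib
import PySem

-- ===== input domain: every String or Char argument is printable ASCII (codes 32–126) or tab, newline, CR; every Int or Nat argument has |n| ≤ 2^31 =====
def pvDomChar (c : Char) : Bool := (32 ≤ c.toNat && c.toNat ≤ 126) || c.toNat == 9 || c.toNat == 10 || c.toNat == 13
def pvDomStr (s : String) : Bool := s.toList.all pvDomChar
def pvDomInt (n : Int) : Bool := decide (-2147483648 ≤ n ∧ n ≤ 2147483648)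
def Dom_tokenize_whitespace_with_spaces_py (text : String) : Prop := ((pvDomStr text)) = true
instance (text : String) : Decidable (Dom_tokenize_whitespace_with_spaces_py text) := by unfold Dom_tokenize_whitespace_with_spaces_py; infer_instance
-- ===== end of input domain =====

-- B is an alternative single pass over maximal runs instead of A's char-by-char accumulator; same cost.

-- ===== PORT A =====
-- state: (tokens, current_token as List Char); one fold step per character, as in A
def pvStepA (st : List String × List Char) (c : Char) : List String × List Char :=
  if PySem.Chars.isspace c then
    ((if st.2 ≠ [] then st.1 ++ [String.mk st.2] else st.1) ++ [" "], [])
  else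
    (st.1, st.2 ++ [c])

def tokenize_whitespace_with_spaces_py (text : String) : List String :=
  if text = "" then []
  else
    let st := text.toList.foldl pvStepA ([], [])
    if st.2 ≠ [] then st.1 ++ [String.mk st.2] else st.1

-- ===== PORT B =====
-- run-based scan: each step consumes a maximal whitespace or non-whitespace run
def pvGoB : List Char → List String
  | [] => []
  | c :: rest =>
    if PySem.Chars.isspace c then
      List.replicate ((rest.takeWhile PySem.Chars.isspace).length + 1) " " ++
        pvGoB (rest.dropWhile PySem.Chars.isspace)
    else
      String.mk (c :: rest.takeWhile (fun d => !PySem.Chars.isspace d)) ::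
        pvGoB (rest.dropWhile (fun d => !PySem.Chars.isspace d))
  termination_by cs => cs.length
  decreasing_by
    · exact Nat.lt_succ_of_le (List.length_dropWhile_le _ _)
    · exact Nat.lt_succ_of_le (List.length_dropWhile_le _ _)

def tokenize_whitespace_with_spaces_py_alt (text : String) : List String :=
  pvGoB text.toList

-- ===== PRECONDITION & SPEC =====
def Spec_tokenize_whitespace_with_spaces_py (text : String) (out : List String) : Prop := out = tokenize_whitespace_with_spaces_py_alt text
instance (text : String) (out : List String) : Decidable (Spec_tokenize_whitespace_with_spaces_py text out) := by unfold Spec_tokenize_whitespace_with_spaces_py; infer_instance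

-- ===== CLAIM (what is proved, stated in full; the proofs are below) =====
def Claim_equal_tokenize_whitespace_with_spaces_py : Prop := ∀ (text : String), Dom_tokenize_whitespace_with_spaces_py text → Spec_tokenize_whitespace_with_spaces_py text (tokenize_whitespace_with_spaces_py text)

-- ===== LEMMAS AND PROOFS =====

-- B's result when a (possibly empty) word `cur` is still pending before `cs`
def pvGoB' (cur : List Char) (cs : List Char) : List String :=
  if cur = [] then pvGoB cs
  else
    String.mk (cur ++ cs.takeWhile (fun d => !PySem.Chars.isspace d)) ::
      pvGoB (cs.dropWhile (fun d => !PySem.Chars.isspace d))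

lemma pvGoB_cons_nonspace (c : Char) (rest : List Char) (h : PySem.Chars.isspace c = false) :
    pvGoB (c :: rest) =
      String.mk (c :: rest.takeWhile (fun d => !PySem.Chars.isspace d)) ::
        pvGoB (rest.dropWhile (fun d => !PySem.Chars.isspace d)) := by
  rw [pvGoB.eq_def]; simp [h]

-- one whitespace-run unfolding of pvGoB (also valid when cs starts non-whitespace: the run is empty)
lemma pvGoB_ws_run (cs : List Char) :
    pvGoB cs = List.replicate (cs.takeWhile PySem.Chars.isspace).length " " ++
      pvGoB (cs.dropWhile PySem.Chars.isspace) := by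
  cases cs with
  | nil => simp
  | cons c rest =>
    by_cases h : PySem.Chars.isspace c
    · rw [pvGoB.eq_def]
      simp [h, List.replicate_succ]
    · rw [List.takeWhile_cons, List.dropWhile_cons]
      simp [h]

lemma pvFold_eq_goB' (cs : List Char) : ∀ (toks : List String) (cur : List Char),
    (let st := cs.foldl pvStepA (toks, cur)
     if st.2 ≠ [] then st.1 ++ [String.mk st.2] else st.1) = toks ++ pvGoB' cur cs := by
  induction cs with
  | nil =>
    intro toks cur
    by_cases h : cur = [] <;> simp [pvGoB', pvGoB, h]
  | cons c rest ih =>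
    intro toks cur
    by_cases h : PySem.Chars.isspace c
    · have step : pvStepA (toks, cur) c =
        ((if cur ≠ [] then toks ++ [String.mk cur] else toks) ++ [" "], []) := by
        simp [pvStepA, h]
      have hcr : pvGoB (c :: rest) =
          " " :: (List.replicate (rest.takeWhile PySem.Chars.isspace).length " " ++
            pvGoB (rest.dropWhile PySem.Chars.isspace)) := by
        rw [pvGoB.eq_def]; simp [h, List.replicate_succ]
      simp only [List.foldl_cons, step, ih]
      by_cases hc : cur = []
      · simp only [hc, pvGoB', hcr]
        simp [pvGoB_ws_run rest]
      · simp only [pvGoB', hc, List.takeWhile_cons, List.dropWhile_cons]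
        simp only [h, Bool.not_true, Bool.false_eq_true, if_false]
        simp [hc, hcr, pvGoB_ws_run rest]
    · have h' : PySem.Chars.isspace c = false := by simpa using h
      have step : pvStepA (toks, cur) c = (toks, cur ++ [c]) := by
        simp [pvStepA, h]
      simp only [List.foldl_cons, step, ih]
      congr 1
      by_cases hc : cur = []
      · subst hc
        rw [pvGoB']
        simp [pvGoB_cons_nonspace c rest h', pvGoB']
      · rw [pvGoB', pvGoB']
        simp only [List.takeWhile_cons, List.dropWhile_cons, h', Bool.not_false, if_true]
        simp [hc, List.append_assoc]
-- ===== VERDICT (by name: the statement is the Claim_ definition above) =====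
theorem tokenize_whitespace_with_spaces_py_spec : Claim_equal_tokenize_whitespace_with_spaces_py := by
  intro text _
  unfold Spec_tokenize_whitespace_with_spaces_py tokenize_whitespace_with_spaces_py tokenize_whitespace_with_spaces_py_alt
  by_cases h : text = ""
  · subst h; simp [pvGoB]
  · simp only [h, if_false]
    rw [pvFold_eq_goB' text.toList [] []]
    simp [pvGoB']
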